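-- pv_equiv track=rewrite | github.com/HasiniJa/Hasini- | Lab-05/challenge7.py | substitute_data
-- ===== SOURCE A (Python) =====
-- def substitute_data(list_of_dicts):
--     """Substitutes specific values in the list of dictionaries."""
--     for row in list_of_dicts:
--         if row.get('First Name') == 'Christopher':
--             row['First Name'] = 'Chris'
--         if row.get('Last Name') == 'Patal':
--             row['Last Name'] = 'Patel'
--         if row.get('Last Name') == 'Smith':
--             row['Last Name'] = 'Nichols'
--         if row.get('Address') == '81 Vanier':
--             row['Address'] = '72 Princeton'
--         if row.get('Last Name') == 'Geary':
--             row['Address'] = '455 Bloor'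
--         if row.get('City') == 'North York':
--             row['City'] = 'Toronto'
--         if 'Country' in row and row['Country'] == 'Canada':
--             row['Country'] = 'CA'
--     return list_of_dicts
-- ===== SOURCE B (Python) =====
-- # B: per-row pass over the row's OWN entries with one (field, value)-keyed hash lookup replacing
-- # the six value-rewrite branches, plus one staged pass for the cross-field Geary->Address rule.
-- # Mutates the rows in place like A; the proved equivalence is about the return value.
-- VALUE_SUBS = {
--     ("First Name", "Christopher"): "Chris",
--     ("Last Name", "Patal"): "Patel",
--     ("Last Name", "Smith"): "Nichols",
--     ("Address", "81 Vanier"): "72 Princeton",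
--     ("City", "North York"): "Toronto",
--     ("Country", "Canada"): "CA",
-- }
--
--
-- def substitute_data(list_of_dicts):
--     for row in list_of_dicts:
--         for field, value in list(row.items()):
--             row[field] = VALUE_SUBS.get((field, value), value)
--         if row.get("Last Name") == "Geary":
--             row["Address"] = "455 Bloor"
--     return list_of_dicts
-- ===== Notes on version B (the rewrite author's own statement) =====
-- stated objective: idiomatic
-- what changed: B iterates over each row's own entries applying a single (field,value)-keyed hash lookup for the six value rewrites, then one staged pass for the cross-field Geary->Address rule, instead of A's fixed chain of seven field-specific if-statements; Pre_ only excludes association lists with duplicate keys inside a row, which represent no Python dict.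
import Mathlib
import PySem

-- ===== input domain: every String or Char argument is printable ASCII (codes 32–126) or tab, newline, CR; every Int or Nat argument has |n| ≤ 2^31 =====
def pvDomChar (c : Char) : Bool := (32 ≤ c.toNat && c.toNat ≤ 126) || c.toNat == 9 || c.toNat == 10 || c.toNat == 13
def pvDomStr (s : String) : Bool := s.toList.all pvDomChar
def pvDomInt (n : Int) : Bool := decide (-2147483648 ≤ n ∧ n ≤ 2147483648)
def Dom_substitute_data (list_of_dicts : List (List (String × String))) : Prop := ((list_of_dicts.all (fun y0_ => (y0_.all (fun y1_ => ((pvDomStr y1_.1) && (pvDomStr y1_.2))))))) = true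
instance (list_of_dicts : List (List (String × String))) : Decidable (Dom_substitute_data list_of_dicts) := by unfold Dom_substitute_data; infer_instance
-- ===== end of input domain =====

-- B walks each row's own entries with one (field,value)-keyed hash lookup plus a staged Geary->Address
-- pass, instead of A's fixed chain of seven if-statements. Both Pythons mutate the rows in place and
-- return the same list; the equivalence proved here is about the return value.

-- ===== PORT A =====
-- A: a fixed chain of seven ifs over the row (dict = PySem.Dict over the association list).
def pvSubRow (row : List (String × String)) : List (String × String) :=
  let d0 := PySem.Dict.mk row
  let d1 := if d0.get? "First Name" == some "Christopher" then d0.insert "First Name" "Chris" else d0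
  let d2 := if d1.get? "Last Name" == some "Patal" then d1.insert "Last Name" "Patel" else d1
  let d3 := if d2.get? "Last Name" == some "Smith" then d2.insert "Last Name" "Nichols" else d2
  let d4 := if d3.get? "Address" == some "81 Vanier" then d3.insert "Address" "72 Princeton" else d3
  let d5 := if d4.get? "Last Name" == some "Geary" then d4.insert "Address" "455 Bloor" else d4
  let d6 := if d5.get? "City" == some "North York" then d5.insert "City" "Toronto" else d5
  -- "'Country' in row and row['Country'] == 'Canada'"
  let d7 := if d6.contains "Country" && (d6.get? "Country" == some "Canada") then d6.insert "Country" "CA" else d6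
  d7.items

def substitute_data (list_of_dicts : List (List (String × String))) : List (List (String × String)) :=
  list_of_dicts.map pvSubRow

-- ===== PORT B =====
-- B: the (field, value) -> new value table VALUE_SUBS.
def pvValueSubs : PySem.Dict (String × String) String :=
  PySem.Dict.mk
    [(("First Name", "Christopher"), "Chris"),
     (("Last Name", "Patal"), "Patel"),
     (("Last Name", "Smith"), "Nichols"),
     (("Address", "81 Vanier"), "72 Princeton"),
     (("City", "North York"), "Toronto"),
     (("Country", "Canada"), "CA")]

-- B's per-row pass: rewrite every entry through VALUE_SUBS, then the staged Geary->Address rule.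
def pvFixRow (row : List (String × String)) : List (String × String) :=
  let d0 := PySem.Dict.mk row
  let d1 := d0.items.foldl (fun d kv => d.insert kv.1 (pvValueSubs.getD (kv.1, kv.2) kv.2)) d0
  let d2 := if d1.get? "Last Name" == some "Geary" then d1.insert "Address" "455 Bloor" else d1
  d2.items

def substitute_data_alt (list_of_dicts : List (List (String × String))) : List (List (String × String)) :=
  list_of_dicts.map pvFixRow

-- ===== PRECONDITION & SPEC =====
-- Pre_ excludes association lists with a duplicate key inside a row: they represent no Python dict
-- (the function's argument is a list of dicts), so A's behaviour there is an artifact of the encoding.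
def Pre_substitute_data (list_of_dicts : List (List (String × String))) : Prop :=
  ∀ row ∈ list_of_dicts, (row.map Prod.fst).Nodup
instance (list_of_dicts : List (List (String × String))) : Decidable (Pre_substitute_data list_of_dicts) := by unfold Pre_substitute_data; infer_instance
def pvWitness_substitute_data : (List (List (String × String))) :=
  [[("First Name", "Christopher"), ("Last Name", "Geary"), ("Country", "Canada")]]

def Spec_substitute_data (list_of_dicts : List (List (String × String))) (out : List (List (String × String))) : Prop := out = substitute_data_alt list_of_dicts
instance (list_of_dicts : List (List (String × String))) (out : List (List (String × String))) : Decidable (Spec_substitute_data list_of_dicts out) := by unfold Spec_substitute_data; infer_instance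

-- ===== CLAIM (what is proved, stated in full; the proofs are below) =====
def Claim_equal_substitute_data : Prop := ∀ (list_of_dicts : List (List (String × String))), Dom_substitute_data list_of_dicts → Pre_substitute_data list_of_dicts → Spec_substitute_data list_of_dicts (substitute_data list_of_dicts)

-- ===== LEMMAS AND PROOFS =====

theorem pv_map_fix {f : String × String → String × String} {l : List (String × String)}
    (h : ∀ p ∈ l, f p = p) : l.map f = l := by
  simpa using List.map_congr_left (g := id) h

def pvH (k cv nv : String) (p : String × String) : String × String :=
  if p.1 = k ∧ p.2 = cv then (k, nv) else p

theorem pv_contains_and_get (d : PySem.Dict String String) (k v : String) :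
    (d.contains k && (d.get? k == some v)) = (d.get? k == some v) := by
  rw [PySem.Dict.contains_eq_isSome_get?]
  cases h : d.get? k <;> simp

theorem pv_keys_map {g : String × String → String × String} (hkey : ∀ p, (g p).1 = p.1)
    (x : List (String × String)) : (x.map g).map Prod.fst = x.map Prod.fst := by
  rw [List.map_map]; exact List.map_congr_left (fun p _ => hkey p)

theorem pvH_key (k cv nv : String) (p : String × String) : (pvH k cv nv p).1 = p.1 := by
  unfold pvH; split <;> simp_all

theorem pv_insert_cons_ne (p : String × String) (rest : List (String × String)) (k v : String)
    (hp : p.1 ≠ k) :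
    (PySem.Dict.mk (p :: rest)).insert k v
      = PySem.Dict.mk (p :: ((PySem.Dict.mk rest).insert k v).items) := by
  simp only [PySem.Dict.insert, PySem.Dict.contains, List.any_cons]
  have hbeq : (p.1 == k) = false := by simpa using hp
  rw [hbeq]
  simp only [Bool.false_or]
  · split
    · simp only [List.map_cons]
      rw [hbeq]
      simp
    · simp

theorem pv_stepA (k cv nv : String) : ∀ (m : List (String × String)),
    (m.map Prod.fst).Nodup →
    (if (PySem.Dict.mk m).get? k == some cv then (PySem.Dict.mk m).insert k nv else PySem.Dict.mk m)
      = PySem.Dict.mk (m.map (pvH k cv nv)) := by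
  intro m
  induction m with
  | nil => intro _; simp [PySem.Dict.get?]
  | cons p rest ih =>
    intro hnd
    simp only [List.map_cons, List.nodup_cons] at hnd
    obtain ⟨hp, hrest⟩ := hnd
    by_cases hk : p.1 = k
    · have hkrest : ∀ q ∈ rest, q.1 ≠ k := by
        intro q hq hqk
        exact hp (by rw [hk, ← hqk]; exact List.mem_map_of_mem hq)
      have hmaprest : rest.map (pvH k cv nv) = rest :=
        pv_map_fix (fun q hq => by unfold pvH; rw [if_neg]; rintro ⟨h1, _⟩; exact hkrest q hq h1)
      by_cases hv : p.2 = cv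
      · rw [if_pos (by simp [PySem.Dict.get?, List.find?_cons_of_pos, hk, hv])]
        simp only [PySem.Dict.insert, PySem.Dict.contains, List.any_cons]
        rw [show (p.1 == k) = true by simpa using hk]
        simp only [Bool.true_or, if_pos]
        congr 1
        simp only [List.map_cons]
        rw [show (p.1 == k) = true by simpa using hk]
        simp only [if_pos]
        congr 1
        · unfold pvH; rw [if_pos ⟨hk, hv⟩]
        · rw [hmaprest]
          exact pv_map_fix (fun q hq => by
            simp [show (q.1 == k) = false by simpa using hkrest q hq])
      · rw [if_neg (by simp [PySem.Dict.get?, List.find?_cons_of_pos, hk]; simpa using hv)]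
        congr 1
        simp only [List.map_cons, hmaprest]
        congr 1
        unfold pvH; rw [if_neg]; rintro ⟨_, h2⟩; exact hv h2
    · have hcond : (PySem.Dict.mk (p :: rest)).get? k = (PySem.Dict.mk rest).get? k := by
        simp [PySem.Dict.get?, List.find?_cons_of_neg, hk]
      have hHp : pvH k cv nv p = p := by
        unfold pvH; rw [if_neg]; rintro ⟨h1, _⟩; exact hk h1
      have ih' := ih hrest
      rw [hcond]
      rw [List.map_cons, hHp]
      by_cases hc : (PySem.Dict.mk rest).get? k == some cv
      · rw [if_pos hc] at ih' ⊢
        rw [pv_insert_cons_ne p rest k nv hk]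
        rw [ih']
      · rw [if_neg hc] at ih' ⊢
        have : rest = rest.map (pvH k cv nv) := congrArg PySem.Dict.items ih'
        rw [← this]

def pvF (p : String × String) : String × String := (p.1, pvValueSubs.getD p p.2)

theorem pv_insert_split (pre post : List (String × String)) (k w v : String)
    (h1 : k ∉ pre.map Prod.fst) (h2 : k ∉ post.map Prod.fst) :
    (PySem.Dict.mk (pre ++ (k, w) :: post)).insert k v
      = PySem.Dict.mk (pre ++ (k, v) :: post) := by
  have hc : (PySem.Dict.mk (pre ++ (k, w) :: post)).contains k = true := by
    simp [PySem.Dict.contains]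
  simp only [PySem.Dict.insert, hc, if_pos]
  congr 1
  rw [List.map_append, List.map_cons]
  congr 1
  · exact pv_map_fix (fun q hq => by
      simp [show (q.1 == k) = false by
        simpa using fun h : q.1 = k => h1 (h ▸ List.mem_map_of_mem hq)])
  · congr 1
    · simp
    · exact pv_map_fix (fun q hq => by
        simp [show (q.1 == k) = false by
          simpa using fun h : q.1 = k => h2 (h ▸ List.mem_map_of_mem hq)])

theorem pv_foldB : ∀ (l pre : List (String × String)),
    ((pre ++ l).map Prod.fst).Nodup →
    (l.foldl (fun d kv => d.insert kv.1 (pvValueSubs.getD (kv.1, kv.2) kv.2)) (PySem.Dict.mk (pre ++ l)))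
      = PySem.Dict.mk (pre ++ l.map pvF) := by
  intro l
  induction l with
  | nil => intro pre _; simp
  | cons kv rest ih =>
    intro pre hnd
    rw [List.map_append, List.map_cons, List.nodup_middle, List.nodup_cons, ← List.map_append] at hnd
    obtain ⟨hnot, hnd'⟩ := hnd
    rw [List.map_append, List.mem_append] at hnot
    push Not at hnot
    rw [List.foldl_cons]
    rw [show (PySem.Dict.mk (pre ++ kv :: rest)).insert kv.1 (pvValueSubs.getD (kv.1, kv.2) kv.2)
          = PySem.Dict.mk (pre ++ pvF kv :: rest) from by
        conv_lhs => rw [show kv = (kv.1, kv.2) from rfl]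
        rw [pv_insert_split pre rest kv.1 kv.2 _ hnot.1 hnot.2]
        rfl]
    rw [show pre ++ pvF kv :: rest = (pre ++ [pvF kv]) ++ rest by simp]
    have hmid : (List.map Prod.fst pre ++ kv.1 :: List.map Prod.fst rest).Nodup := by
      rw [List.nodup_middle, List.nodup_cons]
      refine ⟨by simp [List.mem_append, hnot.1, hnot.2], by rwa [List.map_append] at hnd'⟩
    rw [ih (pre ++ [pvF kv]) (by simpa [pvF] using hmid)]
    simp

-- the Geary test is invariant under key-preserving value maps that preserve "Geary"-ness of Last Name
theorem pv_cond_map (g : String × String → String × String) (hkey : ∀ p, (g p).1 = p.1)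
    (hval : ∀ p, p.1 = "Last Name" → ((g p).2 = "Geary" ↔ p.2 = "Geary")) :
    ∀ (x : List (String × String)),
    ((PySem.Dict.mk (x.map g)).get? "Last Name" == some "Geary")
      = ((PySem.Dict.mk x).get? "Last Name" == some "Geary") := by
  intro x
  induction x with
  | nil => rfl
  | cons p rest ih =>
    simp only [List.map_cons, PySem.Dict.get?] at ih ⊢
    by_cases hp : p.1 = "Last Name"
    · have hb1 : (((g p).1 : String) == "Last Name") = true := by simpa [hkey p] using hp
      have hb2 : ((p.1 : String) == "Last Name") = true := by simpa using hp
      simp only [List.find?_cons, hb1, hb2]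
      simp only [Option.map_some]
      rw [show ∀ (a b : String), ((some a : Option String) == some b) = decide (a = b) from fun a b => by by_cases h : a = b <;> simp [h],
        show ∀ (a b : String), ((some a : Option String) == some b) = decide (a = b) from fun a b => by by_cases h : a = b <;> simp [h]]
      rw [decide_eq_decide]
      exact hval p hp
    · have hb1 : (((g p).1 : String) == "Last Name") = false := by simpa [hkey p] using hp
      have hb2 : ((p.1 : String) == "Last Name") = false := by simpa using hp
      simp only [List.find?_cons, hb1, hb2]
      exact ih

-- inserting a fixed point of g commutes with mapping g when g preserves keys
theorem pv_insert_map_comm (g : String × String → String × String) (hkey : ∀ p, (g p).1 = p.1)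
    (k v : String) (hg : g (k, v) = (k, v)) (x : List (String × String)) :
    (((PySem.Dict.mk x).insert k v).items).map g
      = ((PySem.Dict.mk (x.map g)).insert k v).items := by
  have hcont : (PySem.Dict.mk (x.map g)).contains k = (PySem.Dict.mk x).contains k := by
    simp only [PySem.Dict.contains, List.any_map]
    exact congrArg (List.any x) (funext fun p => by simp [Function.comp, hkey p])
  simp only [PySem.Dict.insert, hcont]
  by_cases hc : (PySem.Dict.mk x).contains k = true
  · simp only [hc, if_pos]
    simp only [List.map_map]
    refine List.map_congr_left (fun p _ => ?_)
    simp only [Function.comp]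
    by_cases hpk : p.1 = k
    · rw [show (p.1 == k) = true by simpa using hpk, show ((g p).1 == k) = true by simpa [hkey p] using hpk]
      simpa using hg
    · rw [show (p.1 == k) = false by simpa using hpk, show ((g p).1 == k) = false by simpa [hkey p] using hpk]
      simp
  · simp only [hc, if_neg, Bool.false_eq_true, not_false_eq_true]
    simp [hg]

def pvG4 (p : String × String) : String × String :=
  pvH "Address" "81 Vanier" "72 Princeton" (pvH "Last Name" "Smith" "Nichols"
    (pvH "Last Name" "Patal" "Patel" (pvH "First Name" "Christopher" "Chris" p)))

def pvG67 (p : String × String) : String × String :=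
  pvH "Country" "Canada" "CA" (pvH "City" "North York" "Toronto" p)

theorem pvG4_key (p : String × String) : (pvG4 p).1 = p.1 := by
  simp [pvG4, pvH_key]

theorem pvG67_key (p : String × String) : (pvG67 p).1 = p.1 := by
  simp [pvG67, pvH_key]

theorem pvF_key (p : String × String) : (pvF p).1 = p.1 := rfl

theorem pv_get?_mk_nil (x : String × String) :
    (PySem.Dict.mk ([] : List ((String × String) × String))).get? x = none := rfl

set_option maxHeartbeats 2000000 in
theorem pv_hcomp (p : String × String) : pvG67 (pvG4 p) = pvF p := by
  obtain ⟨k, v⟩ := p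
  simp only [pvG4, pvG67, pvH, pvF, pvValueSubs, PySem.Dict.getD_eq_get?_getD,
    PySem.Dict.get?_mk_cons, pv_get?_mk_nil, Prod.mk.injEq, beq_iff_eq]
  split_ifs <;> simp_all

theorem pv_hvalG4 (p : String × String) (hp : p.1 = "Last Name") :
    ((pvG4 p).2 = "Geary" ↔ p.2 = "Geary") := by
  obtain ⟨k, v⟩ := p
  simp only at hp
  subst hp
  simp only [pvG4, pvH]
  split_ifs <;> simp_all

theorem pv_hvalF (p : String × String) (hp : p.1 = "Last Name") :
    ((pvF p).2 = "Geary" ↔ p.2 = "Geary") := by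
  obtain ⟨k, v⟩ := p
  simp only at hp
  subst hp
  simp only [pvF, pvValueSubs, PySem.Dict.getD_eq_get?_getD, PySem.Dict.get?_mk_cons,
    pv_get?_mk_nil, Prod.mk.injEq, beq_iff_eq]
  split_ifs <;> (try simp_all) <;> (try (rename_i hv; subst hv; simp_all))

theorem pv_foldB0 (row : List (String × String)) (hnd : (row.map Prod.fst).Nodup) :
    (row.foldl (fun d kv => d.insert kv.1 (pvValueSubs.getD (kv.1, kv.2) kv.2)) (PySem.Dict.mk row))
      = PySem.Dict.mk (row.map pvF) := by
  simpa using pv_foldB row [] (by simpa using hnd)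

theorem pv_keys_nodup_insert (x : List (String × String)) (k v : String)
    (h : (x.map Prod.fst).Nodup) :
    ((((PySem.Dict.mk x).insert k v).items).map Prod.fst).Nodup := by
  have := PySem.Dict.nodup_keys_insert (PySem.Dict.mk x) k v (by simpa [PySem.Dict.keys] using h)
  simpa [PySem.Dict.keys] using this

theorem pv_row (row : List (String × String)) (hnd : (row.map Prod.fst).Nodup) :
    pvSubRow row = pvFixRow row := by
  have nd1 : ((row.map (pvH "First Name" "Christopher" "Chris")).map Prod.fst).Nodup := by
    rw [pv_keys_map (pvH_key _ _ _)]; exact hnd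
  have nd2 : (((row.map (pvH "First Name" "Christopher" "Chris")).map (pvH "Last Name" "Patal" "Patel")).map Prod.fst).Nodup := by
    rw [pv_keys_map (pvH_key _ _ _)]; exact nd1
  have nd3 : ((((row.map (pvH "First Name" "Christopher" "Chris")).map (pvH "Last Name" "Patal" "Patel")).map (pvH "Last Name" "Smith" "Nichols")).map Prod.fst).Nodup := by
    rw [pv_keys_map (pvH_key _ _ _)]; exact nd2
  have ndg4 : ((row.map pvG4).map Prod.fst).Nodup := by
    rw [pv_keys_map pvG4_key]; exact hnd
  unfold pvSubRow pvFixRow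
  dsimp only
  rw [pv_contains_and_get]
  rw [pv_stepA "First Name" "Christopher" "Chris" row hnd]
  rw [pv_stepA "Last Name" "Patal" "Patel" _ nd1]
  rw [pv_stepA "Last Name" "Smith" "Nichols" _ nd2]
  rw [pv_stepA "Address" "81 Vanier" "72 Princeton" _ nd3]
  rw [show (((row.map (pvH "First Name" "Christopher" "Chris")).map (pvH "Last Name" "Patal" "Patel")).map (pvH "Last Name" "Smith" "Nichols")).map (pvH "Address" "81 Vanier" "72 Princeton") = row.map pvG4 from by
    simp only [List.map_map]; rfl]
  rw [pv_foldB0 row hnd]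
  rw [pv_cond_map pvG4 pvG4_key pv_hvalG4 row]
  rw [pv_cond_map pvF pvF_key pv_hvalF row]
  by_cases hG : ((PySem.Dict.mk row).get? "Last Name" == some "Geary") = true
  · rw [if_pos hG, if_pos hG]
    rw [show (PySem.Dict.mk (row.map pvG4)).insert "Address" "455 Bloor"
          = PySem.Dict.mk (((PySem.Dict.mk (row.map pvG4)).insert "Address" "455 Bloor").items) from rfl]
    have ndL5 := pv_keys_nodup_insert (row.map pvG4) "Address" "455 Bloor" ndg4
    rw [pv_stepA "City" "North York" "Toronto" _ ndL5]
    have ndL6 : (((((PySem.Dict.mk (row.map pvG4)).insert "Address" "455 Bloor").items).map (pvH "City" "North York" "Toronto")).map Prod.fst).Nodup := by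
      rw [pv_keys_map (pvH_key _ _ _)]; exact ndL5
    rw [pv_stepA "Country" "Canada" "CA" _ ndL6]
    show ((((PySem.Dict.mk (row.map pvG4)).insert "Address" "455 Bloor").items).map (pvH "City" "North York" "Toronto")).map (pvH "Country" "Canada" "CA") = _
    rw [show ∀ (l : List (String × String)), (l.map (pvH "City" "North York" "Toronto")).map (pvH "Country" "Canada" "CA") = l.map pvG67 from fun l => by
      simp only [List.map_map]; rfl]
    rw [pv_insert_map_comm pvG67 pvG67_key "Address" "455 Bloor" (by simp [pvG67, pvH]) (row.map pvG4)]
    rw [show (row.map pvG4).map pvG67 = row.map pvF from by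
      simp only [List.map_map]
      exact List.map_congr_left (fun p _ => pv_hcomp p)]
  · rw [if_neg hG, if_neg hG]
    have nd5 : (((row.map pvG4).map (pvH "City" "North York" "Toronto")).map Prod.fst).Nodup := by
      rw [pv_keys_map (pvH_key _ _ _)]; exact ndg4
    rw [pv_stepA "City" "North York" "Toronto" _ ndg4]
    rw [pv_stepA "Country" "Canada" "CA" _ nd5]
    show ((row.map pvG4).map (pvH "City" "North York" "Toronto")).map (pvH "Country" "Canada" "CA") = row.map pvF
    simp only [List.map_map]
    exact List.map_congr_left (fun p _ => pv_hcomp p)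

-- ===== VERDICT (by name: the statement is the Claim_ definition above) =====
theorem substitute_data_spec : Claim_equal_substitute_data := by
  intro l _ hpre
  unfold Spec_substitute_data substitute_data substitute_data_alt
  exact List.map_congr_left (fun row hrow => pv_row row (hpre row hrow))
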